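-- pv_equiv track=rewrite | github.com/Frazzer951/Advent-Of-Code | 2015/8/code.py | part2
-- ===== SOURCE A (Python) =====
-- def size_encoded(str):
--     encoded = str
--     encoded = encoded.replace("\\", "\\\\")
--     encoded = encoded.replace('"', '\\"')
--     encoded = '"' + encoded + '"'
--     return len(encoded)
--
-- def part2(input):
--     count = 0
--
--     for line in input:
--         line = line.strip()
--         line_count = len(line)
--         line_enc = size_encoded(line)
--         count += line_enc - line_count
--
--     return count
-- ===== SOURCE B (Python) =====
-- def part2(input):
--     total = 0
--     for line in input:
--         s = line.strip()
--         total += 2 + s.count("\\") + s.count('"')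
--     return total
-- ===== Notes on version B (the rewrite author's own statement) =====
-- stated objective: simpler
-- what changed: Replaces building the escaped string with two .replace passes and measuring its length by a per-line closed form 2 + count of backslashes + count of quotes, summed directly.
import Mathlib
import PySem

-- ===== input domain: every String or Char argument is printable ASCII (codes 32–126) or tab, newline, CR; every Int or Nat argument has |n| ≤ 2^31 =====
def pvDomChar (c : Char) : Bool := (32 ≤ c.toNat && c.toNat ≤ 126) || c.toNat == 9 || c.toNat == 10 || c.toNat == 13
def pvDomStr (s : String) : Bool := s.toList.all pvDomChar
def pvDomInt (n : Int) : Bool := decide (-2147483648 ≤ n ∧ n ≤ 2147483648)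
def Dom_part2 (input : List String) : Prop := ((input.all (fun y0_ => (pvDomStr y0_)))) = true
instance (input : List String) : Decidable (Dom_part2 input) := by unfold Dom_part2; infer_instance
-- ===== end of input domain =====

-- B replaces A's two .replace passes + length measurement with a per-line closed form
-- 2 + count('\') + count('"'); equivalence of return values is proved below.

-- ===== PORT A =====
def size_encoded (str : String) : Int :=
  let encoded := str
  let encoded := PySem.Str.replace encoded "\\" "\\\\"
  let encoded := PySem.Str.replace encoded "\"" "\\\""
  let encoded := "\"" ++ encoded ++ "\""
  (PySem.Str.len encoded : Int)

def part2 (input : List String) : Int :=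
  input.foldl (fun count line =>
    let line := PySem.Str.strip line
    let line_count : Int := (PySem.Str.len line : Int)
    let line_enc : Int := size_encoded line
    count + (line_enc - line_count)) 0

-- ===== PORT B =====
def part2_alt (input : List String) : Int :=
  input.foldl (fun total line =>
    let s := PySem.Str.strip line
    total + (2 + (PySem.Str.count s "\\" : Int) + (PySem.Str.count s "\"" : Int))) 0

-- ===== PRECONDITION & SPEC =====
def Spec_part2 (input : List String) (out : Int) : Prop := out = part2_alt input
instance (input : List String) (out : Int) : Decidable (Spec_part2 input out) := by unfold Spec_part2; infer_instance

-- ===== CLAIM (what is proved, stated in full; the proofs are below) =====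
def Claim_equal_part2 : Prop := ∀ (input : List String), Dom_part2 input → Spec_part2 input (part2 input)

-- ===== LEMMAS AND PROOFS =====

-- single-character replace is a flatMap substitution
theorem replace_go_single (c : Char) (new : List Char) :
    ∀ (fuel : Nat) (l acc : List Char), l.length ≤ fuel →
      PySem.Chars.replace.go [c] new fuel l acc =
        acc.reverse ++ l.flatMap (fun x => if x = c then new else [x]) := by
  intro fuel
  induction fuel with
  | zero =>
    intro l acc h
    have : l = [] := List.eq_nil_of_length_eq_zero (Nat.le_zero.mp h)
    subst this; simp [PySem.Chars.replace.go]
  | succ n ih =>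
    intro l acc h
    cases l with
    | nil => simp [PySem.Chars.replace.go]
    | cons x t =>
      simp only [PySem.Chars.replace.go]
      by_cases hx : x = c
      · subst hx
        have hp : List.isPrefixOf [x] (x :: t) = true := by
          simp [List.isPrefixOf]
        rw [if_pos hp]
        rw [show List.drop [x].length (x :: t) = t from rfl]
        rw [ih t (new.reverse ++ acc) (by simpa using Nat.lt_succ_iff.mp (by simpa using h))]
        simp
      · have hp : List.isPrefixOf [c] (x :: t) = false := by
          simp only [List.isPrefixOf, Bool.and_eq_false_iff, beq_eq_false_iff_ne]
          exact Or.inl fun hcx => hx hcx.symm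
        rw [if_neg (by simp [hp])]
        rw [ih t (x :: acc) (by simpa using Nat.lt_succ_iff.mp (by simpa using h))]
        simp [hx]

theorem replace_single (c : Char) (new : List Char) (s : List Char) :
    PySem.Chars.replace s [c] new = s.flatMap (fun x => if x = c then new else [x]) := by
  simp [PySem.Chars.replace, replace_go_single c new s.length s [] le_rfl]

-- single-character count is List.count
theorem count_go_single (c : Char) :
    ∀ (fuel : Nat) (l : List Char) (acc : Nat), l.length ≤ fuel →
      PySem.Chars.count.go [c] fuel l acc = acc + l.count c := by
  intro fuel
  induction fuel with
  | zero =>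
    intro l acc h
    have : l = [] := List.eq_nil_of_length_eq_zero (Nat.le_zero.mp h)
    subst this; simp [PySem.Chars.count.go]
  | succ n ih =>
    intro l acc h
    cases l with
    | nil => simp [PySem.Chars.count.go]
    | cons x t =>
      simp only [PySem.Chars.count.go]
      by_cases hx : x = c
      · subst hx
        have hp : List.isPrefixOf [x] (x :: t) = true := by simp [List.isPrefixOf]
        rw [if_pos hp]
        rw [show List.drop [x].length (x :: t) = t from rfl]
        rw [ih t (acc + 1) (by simpa using Nat.lt_succ_iff.mp (by simpa using h))]
        simp
        omega
      · have hp : List.isPrefixOf [c] (x :: t) = false := by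
          simp only [List.isPrefixOf, Bool.and_eq_false_iff, beq_eq_false_iff_ne]
          exact Or.inl fun hcx => hx hcx.symm
        rw [if_neg (by simp [hp])]
        rw [ih t acc (by simpa using Nat.lt_succ_iff.mp (by simpa using h))]
        simp [hx]

theorem count_single (c : Char) (s : List Char) :
    PySem.Chars.count s [c] = s.count c := by
  simp [PySem.Chars.count, count_go_single c s.length s 0 le_rfl]

-- length of the two-pass escape of t
theorem escaped_length (t : List Char) :
    ((t.flatMap (fun x => if x = '\\' then ['\\', '\\'] else [x])).flatMap
        (fun x => if x = '"' then ['\\', '"'] else [x])).length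
      = t.length + t.count '\\' + t.count '"' := by
  induction t with
  | nil => simp
  | cons x t ih =>
    by_cases h1 : x = '\\'
    · subst h1
      simp only [List.flatMap_cons, List.flatMap_append, List.length_append]
      simp [ih]
      omega
    · by_cases h2 : x = '"'
      · subst h2
        simp only [List.flatMap_cons, List.flatMap_append, List.length_append]
        rw [if_neg h1]
        simp [ih, h1]
        omega
      · simp only [List.flatMap_cons, List.flatMap_append, List.length_append]
        rw [if_neg h1]
        simp [ih, h1, h2]
        omega

-- per-line agreement of the two contributions
theorem per_line (line : String) :
    size_encoded (PySem.Str.strip line) - (PySem.Str.len (PySem.Str.strip line) : Int)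
      = 2 + (PySem.Str.count (PySem.Str.strip line) "\\" : Int)
          + (PySem.Str.count (PySem.Str.strip line) "\"" : Int) := by
  set s := PySem.Str.strip line with hs
  show size_encoded s - (PySem.Str.len s : Int) = _
  unfold size_encoded
  simp only [PySem.Str.replace, PySem.Str.len, PySem.Str.count]
  have h1 : ("\\" : String).toList = ['\\'] := rfl
  have h2 : ("\\\\" : String).toList = ['\\', '\\'] := rfl
  have h3 : ("\"" : String).toList = ['"'] := rfl
  have h4 : ("\\\"" : String).toList = ['\\', '"'] := rfl
  simp only [String.toList_append,
    String.toList_ofList, h1, h2, h3, h4]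
  rw [replace_single, replace_single, count_single, count_single]
  simp only [List.length_append, escaped_length, List.length_cons, List.length_nil]
  push_cast
  ring

theorem fold_eq (l : List String) : ∀ (a : Int),
    l.foldl (fun count line =>
      let line := PySem.Str.strip line
      let line_count : Int := (PySem.Str.len line : Int)
      let line_enc : Int := size_encoded line
      count + (line_enc - line_count)) a
    = l.foldl (fun total line =>
      let s := PySem.Str.strip line
      total + (2 + (PySem.Str.count s "\\" : Int) + (PySem.Str.count s "\"" : Int))) a := by
  induction l with
  | nil => intro a; simp only [List.foldl_nil]
  | cons x t ih =>
    intro a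
    rw [List.foldl_cons, List.foldl_cons, ih]
    have e : a + (size_encoded (PySem.Str.strip x) - (PySem.Str.len (PySem.Str.strip x) : Int))
        = a + (2 + (PySem.Str.count (PySem.Str.strip x) "\\" : Int)
            + (PySem.Str.count (PySem.Str.strip x) "\"" : Int)) := by
      have h := per_line x
      linarith
    show List.foldl _
        (a + (size_encoded (PySem.Str.strip x) - (PySem.Str.len (PySem.Str.strip x) : Int))) t
      = List.foldl _
        (a + (2 + (PySem.Str.count (PySem.Str.strip x) "\\" : Int)
            + (PySem.Str.count (PySem.Str.strip x) "\"" : Int))) t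
    rw [e]

-- ===== VERDICT (by name: the statement is the Claim_ definition above) =====
theorem part2_spec : Claim_equal_part2 := by
  unfold Claim_equal_part2
  intro input _
  unfold Spec_part2 part2 part2_alt
  exact fold_eq input 0
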